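-- pv_equiv track=rewrite | github.com/iamez/slomix | bot/core/database_adapter.py | _translate_placeholders
-- ===== SOURCE A (Python) =====
-- def _translate_placeholders(query: str) -> str:
--     """
--     Translate SQLite-style ? placeholders to PostgreSQL $1, $2, etc.
--
--     This allows code to use ? placeholders (portable) while using PostgreSQL.
--     """
--     if '?' not in query:
--         return query
--
--     # Replace ? with $1, $2, $3, etc.
--     result = []
--     param_num = 1
--     i = 0
--     while i < len(query):
--         if query[i] == '?':
--             result.append(f'${param_num}')
--             param_num += 1
--         else:
--             result.append(query[i])
--         i += 1
--
--     return ''.join(result)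
-- ===== SOURCE B (Python) =====
-- def _translate_placeholders(query: str) -> str:
--     """Translate SQLite-style ? placeholders to PostgreSQL $1, $2, ... by
--     splitting on '?' and interleaving the numbered parameters between segments."""
--     parts = query.split('?')
--     pieces = [parts[0]]
--     n = 1
--     for part in parts[1:]:
--         pieces.append(f'${n}')
--         pieces.append(part)
--         n += 1
--     return ''.join(pieces)
-- ===== Notes on version B (the rewrite author's own statement) =====
-- stated objective: idiomatic
-- what changed: B splits the query on '?' once and interleaves '$n' between the resulting segments by enumeration, instead of A's character-by-character scan with a maintained counter and per-character branch.
import Mathlib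
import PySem

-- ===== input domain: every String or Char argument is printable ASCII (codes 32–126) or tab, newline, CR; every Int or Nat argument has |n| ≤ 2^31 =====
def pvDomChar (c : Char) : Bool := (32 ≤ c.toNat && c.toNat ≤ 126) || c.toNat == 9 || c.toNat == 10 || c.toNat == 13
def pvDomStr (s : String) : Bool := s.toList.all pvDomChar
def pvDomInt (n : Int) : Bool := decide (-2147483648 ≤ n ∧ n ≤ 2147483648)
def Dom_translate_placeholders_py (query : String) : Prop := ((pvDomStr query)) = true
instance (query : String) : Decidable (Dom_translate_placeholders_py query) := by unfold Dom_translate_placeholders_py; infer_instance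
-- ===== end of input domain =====

-- B splits the query once on '?' and interleaves '$n' between the segments by
-- enumeration, instead of A's per-character scan with a maintained counter (idiomatic).

-- ===== PORT A =====
-- the while loop of A: walks the characters, appending '$<param_num>' or the character
def tpAL : List Char → Int → List (List Char) → List (List Char)
  | [], _, result => result
  | c :: rest, param_num, result =>
    if c = '?' then tpAL rest (param_num + 1) (result ++ [['$'] ++ PySem.Int.toChars param_num])
    else tpAL rest param_num (result ++ [[c]])

def translate_placeholders_py (query : String) : String :=
  if PySem.Chars.isIn ['?'] query.toList = false then query
  else String.ofList (PySem.Chars.join [] (tpAL query.toList 1 []))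

-- ===== PORT B =====
-- the for loop of B: for part in parts[1:]: append '$<n>'; append part; n += 1
def tpBL : List (List Char) → Int × List (List Char) → Int × List (List Char)
  | [], st => st
  | part :: ps, (n, pieces) =>
      tpBL ps (n + 1, pieces ++ [['$'] ++ PySem.Int.toChars n] ++ [part])

def translate_placeholders_py_alt (query : String) : String :=
  let parts := PySem.Chars.splitOn query.toList ['?']
  String.ofList (PySem.Chars.join [] (tpBL parts.tail (1, [parts.headD []])).2)

-- ===== PRECONDITION & SPEC =====
def Spec_translate_placeholders_py (query : String) (out : String) : Prop := out = translate_placeholders_py_alt query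
instance (query : String) (out : String) : Decidable (Spec_translate_placeholders_py query out) := by unfold Spec_translate_placeholders_py; infer_instance

-- ===== CLAIM (what is proved, stated in full; the proofs are below) =====
def Claim_equal_translate_placeholders_py : Prop := ∀ (query : String), Dom_translate_placeholders_py query → Spec_translate_placeholders_py query (translate_placeholders_py query)

-- ===== LEMMAS AND PROOFS =====

-- the common flattened value: '$n', '$n+1', … substituted for successive '?'
def tpF : List Char → Int → List Char
  | [], _ => []
  | c :: rest, n =>
    if c = '?' then (['$'] ++ PySem.Int.toChars n) ++ tpF rest (n + 1)
    else c :: tpF rest n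

-- structural version of PySem.Chars.splitOn s ['?']
def tpSplit : List Char → List Char → List (List Char)
  | [], cur => [cur.reverse]
  | c :: rest, cur =>
    if c = '?' then cur.reverse :: tpSplit rest []
    else tpSplit rest (c :: cur)

-- the '$n ++ part' interleaving over the tail segments
def tpRest : List (List Char) → Int → List Char
  | [], _ => []
  | q :: qs, n => (['$'] ++ PySem.Int.toChars n) ++ q ++ tpRest qs (n + 1)

theorem tpJoinNil (xs : List (List Char)) : PySem.Chars.join [] xs = xs.flatten := by
  induction xs with
  | nil => rfl
  | cons x xs ih =>
    cases xs with
    | nil => simp [PySem.Chars.join, List.intercalate]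
    | cons y ys =>
      simpa [PySem.Chars.join, List.intercalate] using
        congrArg (x ++ ·) (by simpa [PySem.Chars.join, List.intercalate] using ih)

theorem tpAL_flatten (s : List Char) (n : Int) (result : List (List Char)) :
    (tpAL s n result).flatten = result.flatten ++ tpF s n := by
  induction s generalizing n result with
  | nil => simp [tpAL, tpF]
  | cons c rest ih =>
    by_cases hc : c = '?' <;> simp [tpAL, tpF, hc, ih]

theorem tpSplit_go (fuel : Nat) (l cur : List Char) (acc : List (List Char))
    (h : l.length ≤ fuel) :
    PySem.Chars.splitOn.go ['?'] fuel l cur acc = acc.reverse ++ tpSplit l cur := by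
  induction l generalizing fuel cur acc with
  | nil =>
    cases fuel <;> simp [PySem.Chars.splitOn.go, tpSplit]
  | cons c rest ih =>
    cases fuel with
    | zero => simp at h
    | succ f =>
      by_cases hc : c = '?'
      · subst hc
        rw [show PySem.Chars.splitOn.go ['?'] (f+1) ('?' :: rest) cur acc
              = PySem.Chars.splitOn.go ['?'] f rest [] (cur.reverse :: acc) by
            simp [PySem.Chars.splitOn.go, List.isPrefixOf]]
        rw [ih f [] (cur.reverse :: acc) (by simpa using Nat.le_of_succ_le_succ h)]
        simp [tpSplit]
      · rw [show PySem.Chars.splitOn.go ['?'] (f+1) (c :: rest) cur acc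
              = PySem.Chars.splitOn.go ['?'] f rest (c :: cur) acc by
            simp [PySem.Chars.splitOn.go, List.isPrefixOf, Ne.symm hc]]
        rw [ih f (c :: cur) acc (by simpa using Nat.le_of_succ_le_succ h)]
        simp [tpSplit, hc]

theorem tpSplit_eq (s : List Char) :
    PySem.Chars.splitOn s ['?'] = tpSplit s [] := by
  simpa using tpSplit_go (s.length + 1) s [] [] (by omega)

theorem tpSplit_ne_nil (s cur : List Char) : tpSplit s cur ≠ [] := by
  induction s generalizing cur with
  | nil => simp [tpSplit]
  | cons c rest ih =>
    by_cases hc : c = '?' <;> simp [tpSplit, hc, ih]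

theorem tpSplit_interleave (s cur : List Char) (n : Int) :
    (tpSplit s cur).headD [] ++ tpRest (tpSplit s cur).tail n
      = cur.reverse ++ tpF s n := by
  induction s generalizing cur n with
  | nil => simp [tpSplit, tpRest, tpF]
  | cons c rest ih =>
    by_cases hc : c = '?'
    · subst hc
      obtain ⟨h, t, hht⟩ := List.exists_cons_of_ne_nil (tpSplit_ne_nil rest [])
      have key := ih [] (n + 1)
      rw [hht] at key
      simp only [List.headD_cons, List.tail_cons, List.reverse_nil, List.nil_append] at key
      rw [show tpSplit ('?' :: rest) cur = cur.reverse :: tpSplit rest [] from by simp [tpSplit],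
          hht]
      simp [tpRest, tpF, key]
    · have := ih (c :: cur) n
      rw [show tpSplit (c :: rest) cur = tpSplit rest (c :: cur) from by simp [tpSplit, hc]]
      simp only [tpF, if_neg hc]
      simpa using this

theorem tpBL_flatten (ps : List (List Char)) (n : Int) (pieces : List (List Char)) :
    (tpBL ps (n, pieces)).2.flatten = pieces.flatten ++ tpRest ps n := by
  induction ps generalizing n pieces with
  | nil => simp [tpBL, tpRest]
  | cons q qs ih => simp [tpBL, tpRest, ih]

theorem tpAlt_eq (query : String) :
    translate_placeholders_py_alt query = String.ofList (tpF query.toList 1) := by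
  obtain ⟨h, t, hht⟩ := List.exists_cons_of_ne_nil (tpSplit_ne_nil query.toList [])
  have key := tpSplit_interleave query.toList [] 1
  rw [hht] at key
  simp only [List.headD_cons, List.tail_cons, List.reverse_nil, List.nil_append] at key
  show String.ofList (PySem.Chars.join [] (tpBL (PySem.Chars.splitOn query.toList ['?']).tail
      (1, [(PySem.Chars.splitOn query.toList ['?']).headD []])).2) = _
  rw [tpSplit_eq, hht, tpJoinNil, List.tail_cons, List.headD_cons, tpBL_flatten]
  simp [key]

theorem tpF_no_q (s : List Char) (n : Int) (h : '?' ∉ s) : tpF s n = s := by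
  induction s with
  | nil => rfl
  | cons c rest ih =>
    simp only [List.mem_cons, not_or] at h
    simp [tpF, Ne.symm h.1, ih h.2]

-- ===== VERDICT (by name: the statement is the Claim_ definition above) =====
theorem translate_placeholders_py_spec : Claim_equal_translate_placeholders_py := by
  intro query _
  unfold Spec_translate_placeholders_py translate_placeholders_py
  rw [tpAlt_eq]
  by_cases h : PySem.Chars.isIn ['?'] query.toList = false
  · rw [if_pos h]
    have hnot : '?' ∉ query.toList := by
      intro hm
      rw [PySem.Chars.isIn_eq_false_iff] at h
      obtain ⟨l1, l2, hs⟩ := List.append_of_mem hm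
      exact h ⟨l1, l2, by simp [hs]⟩
    rw [tpF_no_q _ _ hnot]
    exact String.ofList_toList.symm
  · rw [if_neg h]
    rw [tpJoinNil, tpAL_flatten]
    simp
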